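-- pv_equiv track=rewrite | github.com/HighDiceRoller/icepool | hdroller/choose.py | _partial_iter_multichoose_sorted_outcomes
-- ===== SOURCE A (Python) =====
-- def _partial_iter_multichoose_sorted_outcomes(n, k, head):
--     if k == 1:
--         for x in range(head, n):
--             yield (x,)
--     else:
--         for x in range(head, n):
--             for tail in _partial_iter_multichoose_sorted_outcomes(n, k-1, x):
--                 yield (x,) + tail
-- ===== SOURCE B (Python) =====
-- def _partial_iter_multichoose_sorted_outcomes(n, k, head):
--     # Bottom-up DP table over start values instead of naive recursion.
--     if k < 1 or head >= n:
--         return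
--     m = n - head
--     # g[i] = all sorted j-multisets drawn from range(head + i, n), current level j.
--     g = [[()]] * (m + 1)  # level 0: one empty tuple for every start value
--     for _ in range(k - 1):
--         new = [[] for _ in range(m + 1)]
--         for i in range(m - 1, -1, -1):
--             new[i] = [(head + i,) + t for t in g[i]] + new[i + 1]
--         g = new
--     for i in range(m):
--         for t in g[i]:
--             yield (head + i,) + t
-- ===== Notes on version B (the rewrite author's own statement) =====
-- stated objective: alternative
-- what changed: Replaces the naive recursive generator with an iterative bottom-up DP: a table of suffix rows (multisets per start value) is rebuilt k times back-to-front, so B has no recursion at all.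
import Mathlib
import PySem

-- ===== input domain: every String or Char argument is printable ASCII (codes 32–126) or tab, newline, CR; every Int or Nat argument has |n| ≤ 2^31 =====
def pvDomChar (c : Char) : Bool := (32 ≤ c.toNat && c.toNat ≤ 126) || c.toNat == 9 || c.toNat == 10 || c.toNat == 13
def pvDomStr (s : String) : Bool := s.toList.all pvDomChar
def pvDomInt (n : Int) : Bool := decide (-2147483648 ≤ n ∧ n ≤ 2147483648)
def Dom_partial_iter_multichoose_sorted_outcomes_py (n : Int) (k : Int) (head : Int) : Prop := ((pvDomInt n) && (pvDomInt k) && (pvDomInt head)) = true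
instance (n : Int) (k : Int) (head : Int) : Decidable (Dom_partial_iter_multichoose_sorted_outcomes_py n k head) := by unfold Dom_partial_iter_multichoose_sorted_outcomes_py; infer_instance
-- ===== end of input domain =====

-- B enumerates the same sorted k-multisets by an iterative bottom-up table instead of A's
-- naive recursion (objective: alternative decomposition; return-value equivalence only).

-- ===== PORT A =====
-- fuel = k.toNat: A recurses on k, decrementing to the base case k == 1; on Pre_ the fuel is exact.
def pvAGo (fuel : Nat) (n : Int) (k : Int) (head : Int) : List (List Int) :=
  match fuel with
  | 0 => []
  | f+1 =>
    if k = 1 then (PySem.List.pyRange head n 1).map (fun x => [x])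
    else (PySem.List.pyRange head n 1).flatMap
      (fun x => (pvAGo f n (k-1) x).map (fun t => x :: t))

def partial_iter_multichoose_sorted_outcomes_py (n : Int) (k : Int) (head : Int) : List (List Int) :=
  pvAGo k.toNat n k head

-- ===== PORT B =====
-- one level step: new[i] = [(x,)+t for t in g[i]] + new[i+1], built from i = m-1 down to 0; new[m] = []
def pvBuildLevel (x : Int) : List (List (List Int)) → List (List (List Int))
  | [] => []
  | [_] => [[]]
  | gi :: rest =>
      let tr := pvBuildLevel (x+1) rest
      ((gi.map (fun t => x :: t)) ++ tr.headD []) :: tr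

def partial_iter_multichoose_sorted_outcomes_py_alt (n : Int) (k : Int) (head : Int) : List (List Int) :=
  if k < 1 ∨ n ≤ head then []
  else
    let m := (n - head).toNat
    let g := (List.range (k.toNat - 1)).foldl (fun g _ => pvBuildLevel head g)
      (List.replicate (m + 1) ([[]] : List (List Int)))
    (List.range m).flatMap (fun i => (g.getD i []).map (fun t => (head + (i : Int)) :: t))

-- ===== PRECONDITION & SPEC =====
-- Pre_ excludes exactly the inputs (k < 1 with head < n) on which A recurses forever and raises RecursionError.
def Pre_partial_iter_multichoose_sorted_outcomes_py (n : Int) (k : Int) (head : Int) : Prop :=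
  1 ≤ k ∨ n ≤ head
instance (n : Int) (k : Int) (head : Int) : Decidable (Pre_partial_iter_multichoose_sorted_outcomes_py n k head) := by unfold Pre_partial_iter_multichoose_sorted_outcomes_py; infer_instance

def pvWitness_partial_iter_multichoose_sorted_outcomes_py : Int × Int × Int := (3, 2, 0)

def Spec_partial_iter_multichoose_sorted_outcomes_py (n : Int) (k : Int) (head : Int) (out : List (List Int)) : Prop := out = partial_iter_multichoose_sorted_outcomes_py_alt n k head
instance (n : Int) (k : Int) (head : Int) (out : List (List Int)) : Decidable (Spec_partial_iter_multichoose_sorted_outcomes_py n k head out) := by unfold Spec_partial_iter_multichoose_sorted_outcomes_py; infer_instance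

-- ===== CLAIM (what is proved, stated in full; the proofs are below) =====
def Claim_equal_partial_iter_multichoose_sorted_outcomes_py : Prop := ∀ (n : Int) (k : Int) (head : Int), Dom_partial_iter_multichoose_sorted_outcomes_py n k head → Pre_partial_iter_multichoose_sorted_outcomes_py n k head → Spec_partial_iter_multichoose_sorted_outcomes_py n k head (partial_iter_multichoose_sorted_outcomes_py n k head)


-- ===== LEMMAS AND PROOFS =====

-- mathematical description: pvGS n j x = the sorted j-multisets over range(x, n), in lex order
def pvGS : Int → Nat → Int → List (List Int)
  | _, 0, _ => [[]]
  | n, j+1, x =>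
      if x < n then ((pvGS n j x).map (fun t => x :: t)) ++ pvGS n (j+1) (x+1) else []
  termination_by n j x => (j, (n - x).toNat)
  decreasing_by
  · exact Prod.Lex.left _ _ (by omega)
  · exact Prod.Lex.right _ (by omega)

-- the row list [pvGS n j x, pvGS n j (x+1), …, pvGS n j n]  (for x ≤ n)
def pvRows (n : Int) (j : Nat) (x : Int) : List (List (List Int)) :=
  if x < n then pvGS n j x :: pvRows n j (x+1) else [pvGS n j x]
  termination_by (n - x).toNat
  decreasing_by omega

theorem pvGS_zero (n x : Int) : pvGS n 0 x = [[]] := by simp [pvGS]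

theorem pvGS_succ (n : Int) (j : Nat) (x : Int) :
    pvGS n (j+1) x = if x < n then ((pvGS n j x).map (fun t => x :: t)) ++ pvGS n (j+1) (x+1) else [] := by
  rw [pvGS]

theorem pvGS_of_ge (n : Int) (j : Nat) (x : Int) (h : n ≤ x) : pvGS n (j+1) x = [] := by
  rw [pvGS_succ, if_neg (by omega)]

theorem pvRows_cons (n : Int) (j : Nat) (x : Int) (h : x < n) :
    pvRows n j x = pvGS n j x :: pvRows n j (x+1) := by rw [pvRows, if_pos h]

theorem pvRows_last (n : Int) (j : Nat) (x : Int) (h : ¬ x < n) :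
    pvRows n j x = [pvGS n j x] := by rw [pvRows, if_neg h]

theorem pvRows_ne_nil (n : Int) (j : Nat) (x : Int) : pvRows n j x ≠ [] := by
  rw [pvRows]; split_ifs <;> simp

theorem pvRows_headD (n : Int) (j : Nat) (x : Int) : (pvRows n j x).headD [] = pvGS n j x := by
  rw [pvRows]; split_ifs <;> simp

theorem pvBuildLevel_spec (n : Int) (j : Nat) (x : Int) (hx : x ≤ n) :
    pvBuildLevel x (pvRows n j x) = pvRows n (j+1) x := by
  by_cases h : x < n
  · rw [pvRows_cons n j x h]
    obtain ⟨b, rest, hbr⟩ : ∃ b rest, pvRows n j (x+1) = b :: rest := by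
      cases hL : pvRows n j (x+1) with
      | nil => exact absurd hL (pvRows_ne_nil n j (x+1))
      | cons b rest => exact ⟨b, rest, rfl⟩
    rw [hbr, pvBuildLevel, ← hbr]
    · have ih : pvBuildLevel (x+1) (pvRows n j (x+1)) = pvRows n (j+1) (x+1) :=
        pvBuildLevel_spec n j (x+1) (by omega)
      rw [ih, pvRows_cons n (j+1) x h, pvRows_headD, pvGS_succ n j x, if_pos h]
    · simp
  · rw [pvRows_last n j x h, pvBuildLevel, pvRows_last n (j+1) x h,
      pvGS_of_ge n j x (by omega)]
  termination_by (n - x).toNat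
  decreasing_by omega

theorem pvReplicate_rows (n x : Int) (hx : x ≤ n) :
    List.replicate ((n - x).toNat + 1) ([[]] : List (List Int)) = pvRows n 0 x := by
  by_cases h : x < n
  · rw [pvRows_cons n 0 x h, pvGS_zero]
    have hlen : (n - x).toNat + 1 = ((n - (x+1)).toNat + 1) + 1 := by omega
    rw [hlen, List.replicate_succ, pvReplicate_rows n (x+1) (by omega)]
  · have : (n - x).toNat = 0 := by omega
    rw [this, pvRows_last n 0 x h, pvGS_zero]; rfl
  termination_by (n - x).toNat
  decreasing_by omega

theorem pvFold_rows (n x : Int) (hx : x ≤ n) (j : Nat) :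
    (List.range j).foldl (fun g _ => pvBuildLevel x g) (pvRows n 0 x) = pvRows n j x := by
  induction j with
  | zero => rfl
  | succ j ih =>
      rw [List.range_succ, List.foldl_append, ih]
      simpa using pvBuildLevel_spec n j x hx

theorem pvA_base (n x : Int) :
    (PySem.List.pyRange x n 1).map (fun y => [y]) = pvGS n 1 x := by
  by_cases h : x < n
  · rw [PySem.List.pyRange_one_cons h, pvGS_succ, if_pos h, pvGS_zero]
    simpa using pvA_base n (x+1)
  · rw [PySem.List.pyRange_one_eq_nil (by omega), pvGS_succ, if_neg h]
    rfl
  termination_by (n - x).toNat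
  decreasing_by omega

theorem pvA_flat (n : Int) (j : Nat) (x : Int)
    (hih : ∀ y : Int, pvAGo (j+1) n ((j : Int)+1) y = pvGS n (j+1) y) :
    (PySem.List.pyRange x n 1).flatMap
      (fun y => (pvAGo (j+1) n ((j : Int)+1) y).map (fun t => y :: t)) = pvGS n (j+2) x := by
  by_cases h : x < n
  · rw [PySem.List.pyRange_one_cons h, List.flatMap_cons, pvA_flat n j (x+1) hih,
      pvGS_succ n (j+1) x, if_pos h, hih x]
  · rw [PySem.List.pyRange_one_eq_nil (by omega), pvGS_succ, if_neg h]
    rfl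
  termination_by (n - x).toNat
  decreasing_by omega

theorem pvA_eq_gs (n : Int) : ∀ (j : Nat) (x : Int),
    pvAGo (j+1) n ((j : Int)+1) x = pvGS n (j+1) x := by
  intro j
  induction j with
  | zero => intro x; simp only [pvAGo, Nat.cast_zero, zero_add]; exact pvA_base n x
  | succ j ih =>
      intro x
      have hk : ((j : Int)+1+1) ≠ 1 := by omega
      have harg : ((j : Int)+1+1) - 1 = (j : Int)+1 := by ring
      simp only [pvAGo, Nat.cast_add, Nat.cast_one, if_neg hk, harg]
      exact pvA_flat n j x ih

theorem pvRows_getD_zero (n : Int) (j : Nat) (x : Int) (h : x < n) :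
    (pvRows n j x).getD 0 [] = pvGS n j x := by
  rw [pvRows_cons n j x h]; rfl

theorem pvFinal (n : Int) (j : Nat) : ∀ (s : Nat) (x : Int), x ≤ n → s = (n - x).toNat →
    (List.range s).flatMap
      (fun i => ((pvRows n j x).getD i []).map (fun t => (x + (i : Int)) :: t))
    = pvGS n (j+1) x := by
  intro s
  induction s with
  | zero =>
      intro x hx hs
      have : ¬ x < n := by omega
      rw [List.range_zero, List.flatMap_nil, pvGS_succ, if_neg this]
  | succ s ih =>
      intro x hx hs
      have h : x < n := by omega
      rw [List.range_succ_eq_map, List.flatMap_cons, List.flatMap_map,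
        pvRows_getD_zero n j x h, pvRows_cons n j x h]
      have hfun : (fun i : Nat => ((pvGS n j x :: pvRows n j (x+1)).getD (i+1) []).map
            (fun t => (x + ((i : Int) + 1)) :: t))
          = (fun i : Nat => ((pvRows n j (x+1)).getD i []).map
            (fun t => ((x + 1) + (i : Int)) :: t)) := by
        funext i
        have : x + ((i : Int) + 1) = (x + 1) + (i : Int) := by ring
        simp [this]
      simp only [Nat.succ_eq_add_one, Nat.cast_add, Nat.cast_one, hfun]
      rw [ih (x+1) (by omega) (by omega), pvGS_succ n j x, if_pos h]
      simp

-- ===== VERDICT (by name: the statement is the Claim_ definition above) =====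
theorem partial_iter_multichoose_sorted_outcomes_py_spec : Claim_equal_partial_iter_multichoose_sorted_outcomes_py := by
  intro n k head _ hPre
  unfold Spec_partial_iter_multichoose_sorted_outcomes_py
  unfold partial_iter_multichoose_sorted_outcomes_py partial_iter_multichoose_sorted_outcomes_py_alt
  by_cases hk : 1 ≤ k
  · -- k ≥ 1 : both sides compute pvGS n k.toNat head
    obtain ⟨j, hj⟩ : ∃ j : Nat, k.toNat = j + 1 :=
      ⟨k.toNat - 1, by omega⟩
    have hkj : k = (j : Int) + 1 := by omega
    have hA : pvAGo k.toNat n k head = pvGS n (j+1) head := by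
      rw [hj, hkj]; exact pvA_eq_gs n j head
    by_cases hhn : n ≤ head
    · rw [if_pos (Or.inr hhn), hA, pvGS_of_ge n j head hhn]
    · rw [if_neg (by omega), hA]
      simp only
      rw [pvReplicate_rows n head (by omega), hj, Nat.add_sub_cancel,
        pvFold_rows n head (by omega) j,
        pvFinal n j (n - head).toNat head (by omega) rfl]
  · -- k < 1 : Pre_ gives n ≤ head; A's fuel is 0, B's guard fires
    have hz : k.toNat = 0 := by omega
    rw [hz, if_pos (Or.inl (by omega))]
    rfl
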